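-- pv_equiv track=rewrite | github.com/rock-mechanics/test-sheet-generator | generate-sheets.py | split_area_mounting
-- ===== SOURCE A (Python) =====
-- def split_area_mounting(pairs) :
--     data_by_mounting = {}
--     for ref_desc, area_mounting in pairs :
--         # empty strings will be ignored
--         if not ref_desc.strip() or not area_mounting.strip():
--             continue
--         if area_mounting not in data_by_mounting :
--             data_by_mounting[area_mounting] = [ref_desc]
--         else :
--             data_by_mounting[area_mounting].append(ref_desc)
--     return data_by_mounting
-- ===== SOURCE B (Python) =====
-- def split_area_mounting(pairs):
--     # two-pass groupby: filter once, then build each group by scanning the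
--     # filtered list per distinct mounting key (first-occurrence key order)
--     filtered = [(r, m) for r, m in pairs if r.strip() and m.strip()]
--     return {m: [r for r, m2 in filtered if m2 == m]
--             for m in dict.fromkeys(m for _, m in filtered)}
-- ===== Notes on version B (the rewrite author's own statement) =====
-- stated objective: alternative
-- what changed: A builds the groups in one pass by mutating a dict (insert on first sight, append afterwards); B filters the pairs once, then builds one entry per distinct mounting key (first-occurrence order via dict.fromkeys) by scanning the filtered list per key.
import Mathlib
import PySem

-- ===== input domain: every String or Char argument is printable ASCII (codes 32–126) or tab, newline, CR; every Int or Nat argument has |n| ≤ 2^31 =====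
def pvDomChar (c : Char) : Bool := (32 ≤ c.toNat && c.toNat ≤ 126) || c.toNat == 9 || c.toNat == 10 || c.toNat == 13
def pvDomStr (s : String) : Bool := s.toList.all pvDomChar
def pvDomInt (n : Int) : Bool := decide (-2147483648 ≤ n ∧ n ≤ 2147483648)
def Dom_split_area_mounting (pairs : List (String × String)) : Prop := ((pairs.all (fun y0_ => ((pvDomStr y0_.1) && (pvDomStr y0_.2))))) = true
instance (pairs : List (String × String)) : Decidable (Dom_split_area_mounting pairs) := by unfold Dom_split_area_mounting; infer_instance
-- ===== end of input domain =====

-- B groups by a filter-once-then-scan-per-distinct-key comprehension instead of A's single-pass dict mutation (alternative decomposition, same return value).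


-- ===== PORT A =====
-- A: one pass; a dict from area_mounting to the list of ref_descs, insert on first sight, append afterwards.
def split_area_mounting (pairs : List (String × String)) : List (String × List String) :=
  (pairs.foldl (fun d p =>
      if PySem.Str.strip p.1 == "" || PySem.Str.strip p.2 == "" then d
      else if !(d.contains p.2) then d.insert p.2 [p.1]
      else d.modify p.2 [] (fun l => l ++ [p.1]))
    PySem.Dict.empty).items

-- ===== PORT B =====
-- B: filter once, then one entry per distinct mounting (first-occurrence order), each built by scanning the filtered list.
def split_area_mounting_alt (pairs : List (String × String)) : List (String × List String) :=
  let filtered := pairs.filter (fun p => !(PySem.Str.strip p.1 == "") && !(PySem.Str.strip p.2 == ""))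
  (PySem.List.dedup (filtered.map (·.2))).map
    (fun m => (m, (filtered.filter (fun p => p.2 == m)).map (·.1)))

-- ===== PRECONDITION & SPEC =====
def Spec_split_area_mounting (pairs : List (String × String)) (out : List (String × List String)) : Prop := out = split_area_mounting_alt pairs
instance (pairs : List (String × String)) (out : List (String × List String)) : Decidable (Spec_split_area_mounting pairs out) := by unfold Spec_split_area_mounting; infer_instance

-- ===== CLAIM (what is proved, stated in full; the proofs are below) =====
def Claim_equal_split_area_mounting : Prop := ∀ (pairs : List (String × String)), Dom_split_area_mounting pairs → Spec_split_area_mounting pairs (split_area_mounting pairs)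

-- ===== LEMMAS AND PROOFS =====

-- A's skip/insert/append step is a filter followed by an unconditional modify step
lemma foldlA_eq_foldl_filter (pairs : List (String × String)) :
    pairs.foldl (fun d p =>
      if PySem.Str.strip p.1 == "" || PySem.Str.strip p.2 == "" then d
      else if !(d.contains p.2) then d.insert p.2 [p.1]
      else d.modify p.2 [] (fun l => l ++ [p.1])) PySem.Dict.empty
    = (pairs.filter (fun p => !(PySem.Str.strip p.1 == "") && !(PySem.Str.strip p.2 == ""))).foldl
        (fun d p => d.modify p.2 [] (fun l => l ++ [p.1])) PySem.Dict.empty := by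
  rw [List.foldl_filter]
  congr 1
  funext d p
  by_cases h1 : PySem.Str.strip p.1 == ""
  · simp [h1]
  · by_cases h2 : PySem.Str.strip p.2 == ""
    · simp [h1, h2]
    · simp only [h1, h2, Bool.or_self, Bool.not_false, Bool.and_self, if_true]
      by_cases hc : d.contains p.2
      · simp [hc]
      · simp only [Bool.not_eq_true] at hc
        simp [hc, PySem.Dict.modify, PySem.Dict.getD_of_not_contains]

-- the items of a dict with Nodup keys are its keys paired with their getD values
lemma items_eq_keys_map_getD (d : PySem.Dict String (List String)) (h : d.keys.Nodup) :
    d.items = d.keys.map (fun k => (k, d.getD k [])) := by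
  conv_lhs => rw [show d.items = d.items.map id from (List.map_id _).symm]
  simp only [PySem.Dict.keys, List.map_map]
  apply List.map_congr_left
  intro p hp
  obtain ⟨k, v⟩ := p
  simp only [id, Function.comp]
  rw [PySem.Dict.getD_of_mem_items _ hp h]

-- ===== VERDICT (by name: the statement is the Claim_ definition above) =====
theorem split_area_mounting_spec : Claim_equal_split_area_mounting := by
  intro pairs _
  unfold Spec_split_area_mounting split_area_mounting split_area_mounting_alt
  rw [foldlA_eq_foldl_filter]
  set filtered := pairs.filter (fun p => !(PySem.Str.strip p.1 == "") && !(PySem.Str.strip p.2 == "")) with hf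
  set d := filtered.foldl (fun d p => d.modify p.2 [] (fun l => l ++ [p.1])) PySem.Dict.empty with hd
  have hswap : d = (filtered.map (fun p => (p.2, p.1))).foldl
      (fun d q => d.modify q.1 [] (fun l => l ++ [q.2])) PySem.Dict.empty := by
    rw [List.foldl_map]
  have hkeys : d.keys = PySem.List.dedup (filtered.map (·.2)) := by
    rw [hd, PySem.Dict.keys_foldl_modify_key filtered (fun p => p.2) [] (fun _ p => fun l => l ++ [p.1]),
        PySem.Dict.keys_empty]
    rfl
  have hnodup : d.keys.Nodup := by
    rw [hd]
    exact PySem.Dict.nodup_keys_foldl_modify_key filtered (fun p => p.2) []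
      (fun _ p => fun l => l ++ [p.1]) _ (by simp [PySem.Dict.keys_empty])
  have hgetD : ∀ c, d.getD c [] = (filtered.filter (fun p => p.2 == c)).map (·.1) := by
    intro c
    rw [hswap, PySem.Dict.getD_foldl_modify_append, PySem.Dict.getD_empty, List.nil_append,
        List.filter_map, List.map_map]
    rfl
  rw [items_eq_keys_map_getD d hnodup, hkeys]
  apply List.map_congr_left
  intro m _
  rw [hgetD m]
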